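-- pv_equiv track=rewrite | github.com/lqh1106/webinfo | lab1-1/list_storage.py | variable_length_decode
-- ===== SOURCE A (Python) =====
-- def variable_length_decode(encoded_bytes):
--     """
--     对编码后的字节流进行解码。
--
--     :param encoded_bytes: 编码后的字节流
--     :return: 解码后的间距列表
--     """
--     gaps = []
--     i = 0
--     current_gap = 0
--     k = 0
--     while i < len(encoded_bytes):
--         byte = encoded_bytes[i]
--         current_gap += (byte & 0x7F) << (7 * k)  # 低7位
--         if(byte & 0x80 == 0):
--             i += 1
--             k += 1
--             continue
--         else:
--             gaps.append(current_gap)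
--             current_gap = 0
--             k = 0
--         i += 1
--     return gaps
-- ===== SOURCE B (Python) =====
-- def variable_length_decode(encoded_bytes):
--     # Phase 1: partition the stream into complete records (a record ends at the
--     # first byte with the high bit set); trailing bytes with no terminator are dropped.
--     groups = []
--     current = []
--     for b in encoded_bytes:
--         current.append(b)
--         if b & 0x80:
--             groups.append(current)
--             current = []
--     # Phase 2: reduce each complete record to its value.
--     return [sum((b & 0x7F) << (7 * k) for k, b in enumerate(g)) for g in groups]
-- ===== Notes on version B (the rewrite author's own statement) =====
-- stated objective: alternative
-- what changed: A's single interleaved loop (index, running accumulator and bit-position counter, emitting on terminator bytes) is replaced by two distinct passes: partition the stream into complete records at high-bit bytes, then map each record to its value with a per-record enumerate-and-sum.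
import Mathlib
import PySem

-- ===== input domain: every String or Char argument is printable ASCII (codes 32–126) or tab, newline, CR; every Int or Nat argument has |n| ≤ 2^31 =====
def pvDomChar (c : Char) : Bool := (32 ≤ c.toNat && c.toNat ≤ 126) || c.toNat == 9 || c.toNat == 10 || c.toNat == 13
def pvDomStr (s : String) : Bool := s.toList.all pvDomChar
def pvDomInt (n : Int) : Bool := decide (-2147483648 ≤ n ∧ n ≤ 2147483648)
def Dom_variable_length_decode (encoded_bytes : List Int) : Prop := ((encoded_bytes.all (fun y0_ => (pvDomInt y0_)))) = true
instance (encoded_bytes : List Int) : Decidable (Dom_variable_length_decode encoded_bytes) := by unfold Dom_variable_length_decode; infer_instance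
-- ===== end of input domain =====

-- B replaces A's single interleaved accumulate-and-emit loop by two passes
-- (partition into complete records, then reduce each record); objective: alternative decomposition.

-- ===== PORT A =====
-- A's while-loop over index i, carrying gaps / current_gap / k; i only advances by 1,
-- so it is transcribed as structural recursion on the remaining suffix with the same state.
-- '(byte & 0x7F) << (7*k)' is ported as 'PySem.Int.band byte 127 * 2^(7*k)' (the shifted
-- operand is nonnegative, so the shift is exactly multiplication by a power of two).
def pvALoop (rest : List Int) (gaps : List Int) (current_gap : Int) (k : Nat) : List Int :=
  match rest with
  | [] => gaps
  | byte :: rest =>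
    let current_gap := current_gap + PySem.Int.band byte 127 * 2 ^ (7 * k)
    if PySem.Int.band byte 128 = 0 then
      pvALoop rest gaps current_gap (k + 1)
    else
      pvALoop rest (gaps ++ [current_gap]) 0 0

def variable_length_decode (encoded_bytes : List Int) : List Int :=
  pvALoop encoded_bytes [] 0 0

-- ===== PORT B =====
-- phase 1 of Source B: partition into complete records (the fold's 'current' list parameter)
def pvSplit (rest : List Int) (current : List Int) : List (List Int) :=
  match rest with
  | [] => []
  | b :: rest =>
    if PySem.Int.band b 128 ≠ 0 then (current ++ [b]) :: pvSplit rest []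
    else pvSplit rest (current ++ [b])

-- phase 2 of Source B: sum((b & 0x7F) << (7*k) for k, b in enumerate(g))
def pvVal (g : List Int) (k : Nat) : Int :=
  match g with
  | [] => 0
  | b :: rest => PySem.Int.band b 127 * 2 ^ (7 * k) + pvVal rest (k + 1)

def variable_length_decode_alt (encoded_bytes : List Int) : List Int :=
  (pvSplit encoded_bytes []).map (fun g => pvVal g 0)

-- ===== PRECONDITION & SPEC =====
def Spec_variable_length_decode (encoded_bytes : List Int) (out : List Int) : Prop := out = variable_length_decode_alt encoded_bytes
instance (encoded_bytes : List Int) (out : List Int) : Decidable (Spec_variable_length_decode encoded_bytes out) := by unfold Spec_variable_length_decode; infer_instance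

-- ===== CLAIM (what is proved, stated in full; the proofs are below) =====
def Claim_equal_variable_length_decode : Prop := ∀ (encoded_bytes : List Int), Dom_variable_length_decode encoded_bytes → Spec_variable_length_decode encoded_bytes (variable_length_decode encoded_bytes)

-- ===== LEMMAS AND PROOFS =====

-- appended gaps commute out of A's loop
theorem pvALoop_gaps (rest : List Int) (gaps : List Int) (cur : Int) (k : Nat) :
    pvALoop rest gaps cur k = gaps ++ pvALoop rest [] cur k := by
  induction rest generalizing gaps cur k with
  | nil => simp [pvALoop]
  | cons b rest ih =>
    simp only [pvALoop]
    split_ifs with h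
    · exact ih ..
    · rw [ih (gaps ++ _), ih ([] ++ _)]; simp

-- extending a record by one byte adds that byte's contribution at its position
theorem pvVal_append (g : List Int) (b : Int) (k : Nat) :
    pvVal (g ++ [b]) k = pvVal g k + PySem.Int.band b 127 * 2 ^ (7 * (k + g.length)) := by
  induction g generalizing k with
  | nil => simp [pvVal]
  | cons x g ih =>
    simp only [List.cons_append, pvVal, ih, List.length_cons]
    ring_nf

-- main invariant: A's loop state (current_gap, k) is exactly the value and length
-- of B's pending record prefix
theorem pvLoop_eq (rest : List Int) (current : List Int) :
    pvALoop rest [] (pvVal current 0) current.length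
      = (pvSplit rest current).map (fun g => pvVal g 0) := by
  induction rest generalizing current with
  | nil => simp [pvALoop, pvSplit]
  | cons b rest ih =>
    simp only [pvALoop, pvSplit]
    by_cases h : PySem.Int.band b 128 = 0
    · simp only [if_pos h, if_neg (not_not_intro h)]
      have := ih (current ++ [b])
      simpa [pvVal_append, List.length_append] using this
    · simp only [if_neg h, if_pos h]
      rw [pvALoop_gaps]
      have h0 : pvVal ([] : List Int) 0 = 0 := rfl
      have := ih ([] : List Int)
      simp only [List.length_nil, h0] at this
      simp [this, pvVal_append]

-- ===== VERDICT (by name: the statement is the Claim_ definition above) =====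
theorem variable_length_decode_spec : Claim_equal_variable_length_decode := by
  intro encoded_bytes _
  show variable_length_decode encoded_bytes = variable_length_decode_alt encoded_bytes
  have := pvLoop_eq encoded_bytes []
  simpa [variable_length_decode, variable_length_decode_alt, pvVal] using this
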